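-- pv_equiv track=rewrite | github.com/PKU-ChallengeCup2022-2023/RC4CSR | System/Recommendation/RecModel/Recommender.py | preprocess_nn
-- ===== SOURCE A (Python) =====
-- def preprocess_nn(pre):
--     """Convert $pre to NN input"""
--
--     res = [0 for i in range(20)]
--
--     # extract category id on the hundredth
--     tmp = [0 for i in range(6)]
--     for i in range(len(pre)):
--         tmp[pre[i] // 100] = tmp[pre[i] // 100] + 1
--
--     # find the 2 favorite categories
--     maxid1, maxval = 0, 0
--     for i in range(len(tmp)):
--         if maxval < tmp[i]:
--             maxid1 = i
--             maxval = tmp[i]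
--     res[0] = maxid1
--     tmp[maxid1] = -1
--     maxid2, maxval = 0, 0
--     for i in range(len(tmp)):
--         if maxval < tmp[i]:
--             maxid2 = i
--             maxval = tmp[i]
--     res[10] = maxid2
--
--     tmp1 = 1
--     tmp2 = 11
--     for i in range(len(pre)):
--         if pre[i] // 100 == maxid1:
--             if tmp1 < 10:
--                 res[tmp1] = pre[i] % 100
--                 tmp1 += 1
--         if pre[i] // 100 == maxid2:
--             if tmp2 < 20:
--                 res[tmp2] = pre[i] % 100
--                 tmp2 += 1
--
--     return res
-- ===== SOURCE B (Python) =====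
-- def preprocess_nn(pre):
--     """Convert $pre to NN input"""
--     groups = {c: [] for c in range(6)}
--     for x in pre:
--         groups[x // 100].append(x % 100)
--     maxid1, maxval = 0, 0
--     for i in range(6):
--         if maxval < len(groups[i]):
--             maxid1, maxval = i, len(groups[i])
--     maxid2, maxval = 0, 0
--     for i in range(6):
--         if i != maxid1 and maxval < len(groups[i]):
--             maxid2, maxval = i, len(groups[i])
--     g1 = groups[maxid1][:9]
--     g2 = groups[maxid2][:9]
--     return [maxid1] + g1 + [0] * (9 - len(g1)) + [maxid2] + g2 + [0] * (9 - len(g2))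
-- ===== Notes on version B (the rewrite author's own statement) =====
-- stated objective: simpler
-- what changed: Instead of counting categories into a fixed array and re-scanning pre twice to copy matching items into a mutated 20-slot result, B buckets pre once into a dict of six per-category lists, picks the two favourites from the bucket lengths (the second scan skips the first winner instead of poisoning its count with -1), and assembles the result by concatenating the two truncated buckets with zero padding.
-- outside the precondition, e.g. on preprocess_nn([-5]): A returns [5, 0, 0, 0, 0, 0, 0, 0, 0, 0, 0, 0, 0, 0, 0, 0, 0, 0, 0, 0], B raises; on preprocess_nn([600]): A raises IndexError, B raises KeyError
import Mathlib
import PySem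

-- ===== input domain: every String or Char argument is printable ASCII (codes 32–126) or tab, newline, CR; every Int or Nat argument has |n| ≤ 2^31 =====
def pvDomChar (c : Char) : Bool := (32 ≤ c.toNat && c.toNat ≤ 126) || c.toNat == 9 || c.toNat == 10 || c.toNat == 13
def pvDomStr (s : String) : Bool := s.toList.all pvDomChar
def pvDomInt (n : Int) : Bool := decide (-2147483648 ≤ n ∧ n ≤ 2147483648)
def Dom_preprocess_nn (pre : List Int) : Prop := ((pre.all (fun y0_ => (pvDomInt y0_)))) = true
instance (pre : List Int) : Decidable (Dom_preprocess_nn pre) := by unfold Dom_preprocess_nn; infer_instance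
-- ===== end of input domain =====

-- B replaces A's count-array + double re-scan of `pre` by one bucketing pass into a dict of
-- six per-category lists and assembles the 20-vector by concatenation (simpler decomposition;
-- return-value equivalence proved on Pre_; A mutates nothing observable).

-- ===== PORT A =====
-- tmp-building loop: for i in range(len(pre)): tmp[pre[i]//100] += 1
def pnnCountLoop (pre : List Int) : List Int :=
  (PySem.List.pyRange 0 (pre.length : Int) 1).foldl
    (fun t i =>
      let x := PySem.List.pyGetD pre i 0
      PySem.List.pySetD t (PySem.Int.floordiv x 100)
        (PySem.List.pyGetD t (PySem.Int.floordiv x 100) 0 + 1))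
    (List.replicate 6 0)

-- the zero-initialised strict-< max scan (used for both maxid1 and maxid2)
def pnnMaxLoop (tmp : List Int) : Int × Int :=
  (PySem.List.pyRange 0 (tmp.length : Int) 1).foldl
    (fun p i => if p.2 < PySem.List.pyGetD tmp i 0 then (i, PySem.List.pyGetD tmp i 0) else p)
    (0, 0)

-- final loop: copy %100 of matching elements into res[1..9] / res[11..19]
def pnnFillLoop (pre : List Int) (maxid1 maxid2 : Int) (st : List Int × Int × Int) :
    List Int × Int × Int :=
  (PySem.List.pyRange 0 (pre.length : Int) 1).foldl
    (fun s i =>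
      let x := PySem.List.pyGetD pre i 0
      let s :=
        if PySem.Int.floordiv x 100 = maxid1 then
          if s.2.1 < 10 then
            (PySem.List.pySetD s.1 s.2.1 (PySem.Int.mod x 100), s.2.1 + 1, s.2.2)
          else s
        else s
      if PySem.Int.floordiv x 100 = maxid2 then
        if s.2.2 < 20 then
          (PySem.List.pySetD s.1 s.2.2 (PySem.Int.mod x 100), s.2.1, s.2.2 + 1)
        else s
      else s)
    st

def preprocess_nn (pre : List Int) : List Int :=
  let res := List.replicate 20 (0 : Int)
  let tmp := pnnCountLoop pre
  let m1 := pnnMaxLoop tmp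
  let maxid1 := m1.1
  let res := PySem.List.pySetD res 0 maxid1
  let tmp := PySem.List.pySetD tmp maxid1 (-1)
  let m2 := pnnMaxLoop tmp
  let maxid2 := m2.1
  let res := PySem.List.pySetD res 10 maxid2
  (pnnFillLoop pre maxid1 maxid2 (res, 1, 11)).1

-- ===== PORT B =====
-- groups = {c: [] for c in range(6)}; for x in pre: groups[x // 100].append(x % 100)
-- (groups[k].append(v) on an always-present key is Dict.modify; for keys outside 0..5
--  the Python raises KeyError, excluded by Pre_)
def pnnGroups (pre : List Int) : PySem.Dict Int (List Int) :=
  pre.foldl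
    (fun g x =>
      PySem.Dict.modify g (PySem.Int.floordiv x 100) [] (fun t => t ++ [PySem.Int.mod x 100]))
    ((PySem.List.pyRange 0 6 1).foldl (fun g c => PySem.Dict.insert g c []) PySem.Dict.empty)

-- first favourite: zero-initialised strict-< scan over the six bucket lengths
def pnnBest1 (groups : PySem.Dict Int (List Int)) : Int × Int :=
  (PySem.List.pyRange 0 6 1).foldl
    (fun p i =>
      if p.2 < ((PySem.Dict.getD groups i []).length : Int) then
        (i, ((PySem.Dict.getD groups i []).length : Int))
      else p)
    (0, 0)

-- second favourite: same scan, skipping the first winner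
def pnnBest2 (groups : PySem.Dict Int (List Int)) (maxid1 : Int) : Int × Int :=
  (PySem.List.pyRange 0 6 1).foldl
    (fun p i =>
      if i ≠ maxid1 ∧ p.2 < ((PySem.Dict.getD groups i []).length : Int) then
        (i, ((PySem.Dict.getD groups i []).length : Int))
      else p)
    (0, 0)

def preprocess_nn_alt (pre : List Int) : List Int :=
  let groups := pnnGroups pre
  let maxid1 := (pnnBest1 groups).1
  let maxid2 := (pnnBest2 groups maxid1).1
  let g1 := PySem.List.slice (PySem.Dict.getD groups maxid1 []) none (some 9)
  let g2 := PySem.List.slice (PySem.Dict.getD groups maxid2 []) none (some 9)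
  [maxid1] ++ g1 ++ List.replicate (9 - g1.length) 0 ++
    [maxid2] ++ g2 ++ List.replicate (9 - g2.length) 0

-- ===== PRECONDITION & SPEC =====
-- Pre_ admits exactly the category ids the 6-slot encoding is for (0 ≤ x < 600).  Outside it A
-- raises IndexError (x ≥ 600 or x < -600) or — for -600 ≤ x < 0 — returns a value that is an
-- accident of Python negative-index wraparound (the id is counted into a high bucket but never
-- emitted by the fill scan); B's dict of buckets raises KeyError on every such id.
def Pre_preprocess_nn (pre : List Int) : Prop := ∀ x ∈ pre, 0 ≤ x ∧ x < 600
instance (pre : List Int) : Decidable (Pre_preprocess_nn pre) := by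
  unfold Pre_preprocess_nn; infer_instance

def pvWitness_preprocess_nn : List Int := [101, 102, 205, 3]

def Spec_preprocess_nn (pre : List Int) (out : List Int) : Prop := out = preprocess_nn_alt pre
instance (pre : List Int) (out : List Int) : Decidable (Spec_preprocess_nn pre out) := by
  unfold Spec_preprocess_nn; infer_instance

-- ===== CLAIM (what is proved, stated in full; the proofs are below) =====
def Claim_equal_preprocess_nn : Prop :=
  ∀ (pre : List Int), Dom_preprocess_nn pre → Pre_preprocess_nn pre →
    Spec_preprocess_nn pre (preprocess_nn pre)



-- ===== LEMMAS AND PROOFS =====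

-- the items of category j, reduced mod 100, in order (proof-side only)
def pnnGrp (j : Int) (l : List Int) : List Int :=
  (l.filter (fun x => decide (x / 100 = j))).map (fun x => x % 100)

-- the result shape both ports build: two 10-slot halves (proof-side only)
def pnnMk (m1 m2 : Int) (F1 F2 : List Int) : List Int :=
  [m1] ++ F1 ++ List.replicate (9 - F1.length) 0 ++ [m2] ++ F2 ++ List.replicate (9 - F2.length) 0

-- A's fill-loop body, split into its two sequential branches (proof-side only)
def pnnFStep1 (m1 : Int) (s : List Int × Int × Int) (x : Int) : List Int × Int × Int :=
  if x / 100 = m1 then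
    if s.2.1 < 10 then (PySem.List.pySetD s.1 s.2.1 (x % 100), s.2.1 + 1, s.2.2) else s
  else s

def pnnFStep2 (m2 : Int) (s : List Int × Int × Int) (x : Int) : List Int × Int × Int :=
  if x / 100 = m2 then
    if s.2.2 < 20 then (PySem.List.pySetD s.1 s.2.2 (x % 100), s.2.1, s.2.2 + 1) else s
  else s

theorem pnn_cat_cases (x : Int) (h0 : 0 ≤ x) (h1 : x < 600) :
    x / 100 = 0 ∨ x / 100 = 1 ∨ x / 100 = 2 ∨ x / 100 = 3 ∨ x / 100 = 4 ∨ x / 100 = 5 := by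
  omega

theorem pnn_count_aux (l : List Int) : ∀ (c0 c1 c2 c3 c4 c5 : Int),
    (∀ x ∈ l, 0 ≤ x ∧ x < 600) →
    l.foldl (fun t x =>
        PySem.List.pySetD t (x / 100)
          (PySem.List.pyGetD t (x / 100) 0 + 1)) [c0, c1, c2, c3, c4, c5]
      = [c0 + ((pnnGrp 0 l).length : Int), c1 + ((pnnGrp 1 l).length : Int),
         c2 + ((pnnGrp 2 l).length : Int), c3 + ((pnnGrp 3 l).length : Int),
         c4 + ((pnnGrp 4 l).length : Int), c5 + ((pnnGrp 5 l).length : Int)] := by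
  induction l with
  | nil => intro c0 c1 c2 c3 c4 c5 _; simp [pnnGrp]
  | cons x l ih =>
    intro c0 c1 c2 c3 c4 c5 hx
    have hl : ∀ y ∈ l, 0 ≤ y ∧ y < 600 := fun y hy => hx y (by simp [hy])
    rcases pnn_cat_cases x (hx x (by simp)).1 (hx x (by simp)).2 with hc | hc | hc | hc | hc | hc <;>
      simp only [List.foldl_cons, hc] <;>
      norm_num [PySem.List.pySetD_of_nonneg, PySem.List.pyGetD_eq_getElem, Int.toNat] <;>
      rw [ih _ _ _ _ _ _ hl] <;>
      simp [pnnGrp, hc] <;> omega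

theorem pnn_groupsD_aux (l : List Int) : ∀ (d : PySem.Dict Int (List Int)) (j : Int),
    (l.foldl (fun g x => PySem.Dict.modify g (x / 100) [] (fun t => t ++ [x % 100])) d).getD j []
      = d.getD j [] ++ pnnGrp j l := by
  induction l with
  | nil => intro d j; simp [pnnGrp]
  | cons x l ih =>
    intro d j
    rw [List.foldl_cons, ih, PySem.Dict.getD_modify]
    by_cases hc : j = x / 100
    · subst hc
      simp [pnnGrp]
    · rw [if_neg hc]
      have hne : ¬ x / 100 = j := fun hh => hc hh.symm
      simp [pnnGrp, hne]

theorem pnn_getD_grpD (pre : List Int) (j : Int) (h0 : 0 ≤ j) (h1 : j < 6) :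
    PySem.Dict.getD (pnnGroups pre) j [] = pnnGrp j pre := by
  unfold pnnGroups
  simp only [Nat.ofNat_pos, PySem.Int.floordiv_eq_ediv_of_pos, PySem.Int.mod_eq_emod_of_pos]
  rw [pnn_groupsD_aux]
  have : j = 0 ∨ j = 1 ∨ j = 2 ∨ j = 3 ∨ j = 4 ∨ j = 5 := by omega
  rcases this with h | h | h | h | h | h <;> subst h <;> rfl

theorem pnn_lenD (pre : List Int) (i : Int) (h0 : 0 ≤ i) (h1 : i < 6) :
    PySem.List.pyGetD [((pnnGrp 0 pre).length : Int), ((pnnGrp 1 pre).length : Int),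
        ((pnnGrp 2 pre).length : Int), ((pnnGrp 3 pre).length : Int),
        ((pnnGrp 4 pre).length : Int), ((pnnGrp 5 pre).length : Int)] i 0
      = ((PySem.Dict.getD (pnnGroups pre) i []).length : Int) := by
  rw [pnn_getD_grpD pre i h0 h1]
  have : i = 0 ∨ i = 1 ∨ i = 2 ∨ i = 3 ∨ i = 4 ∨ i = 5 := by omega
  rcases this with h | h | h | h | h | h <;> subst h <;>
    norm_num [PySem.List.pyGetD_eq_getElem, Int.toNat]

theorem pnn_max_inv (L : List Int) (f : Int → Int) : ∀ (m v : Int),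
    0 ≤ m → m < 6 → 0 ≤ v → (∀ i ∈ L, 0 ≤ i ∧ i < 6) →
    0 ≤ (L.foldl (fun p i => if p.2 < f i then (i, f i) else p) (m, v)).1 ∧
    (L.foldl (fun p i => if p.2 < f i then (i, f i) else p) (m, v)).1 < 6 ∧
    0 ≤ (L.foldl (fun p i => if p.2 < f i then (i, f i) else p) (m, v)).2 := by
  induction L with
  | nil => intro m v h0 h1 h2 _; exact ⟨h0, h1, h2⟩
  | cons a L ih =>
    intro m v h0 h1 h2 hL
    simp only [List.foldl_cons]
    by_cases hc : v < f a
    · simp only [hc, if_pos]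
      exact ih a (f a) (hL a (by simp)).1 (hL a (by simp)).2 (by omega)
        (fun i hi => hL i (by simp [hi]))
    · simp only [hc, if_neg, not_false_iff]
      exact ih m v h0 h1 h2 (fun i hi => hL i (by simp [hi]))

theorem pnn_getD_set_int (xs : List Int) (k i : Int) (v d : Int)
    (hk0 : 0 ≤ k) (hk1 : k < xs.length) (hi0 : 0 ≤ i) :
    PySem.List.pyGetD (PySem.List.pySetD xs k v) i d
      = if i = k then v else PySem.List.pyGetD xs i d := by
  have hk : k = ((k.toNat : Nat) : Int) := by omega
  have hi : i = ((i.toNat : Nat) : Int) := by omega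
  rw [hk, hi, PySem.List.pyGetD_pySetD_natCast xs k.toNat i.toNat v d (by omega)]
  by_cases h : i.toNat = k.toNat
  · simp [h]
  · rw [if_neg h, if_neg (by omega)]

theorem pnn_skip_neg (tmp : List Int) (k : Int) (hk0 : 0 ≤ k) (hk1 : k < tmp.length) :
    ∀ (L : List Int), (∀ i ∈ L, 0 ≤ i ∧ i < tmp.length) → ∀ (m v : Int), 0 ≤ v →
    L.foldl (fun p i =>
        if p.2 < PySem.List.pyGetD (PySem.List.pySetD tmp k (-1)) i 0 then
          (i, PySem.List.pyGetD (PySem.List.pySetD tmp k (-1)) i 0)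
        else p) (m, v)
      = L.foldl (fun p i =>
          if i ≠ k ∧ p.2 < PySem.List.pyGetD tmp i 0 then (i, PySem.List.pyGetD tmp i 0)
          else p) (m, v) := by
  intro L
  induction L with
  | nil => intro _ m v _; rfl
  | cons a L ih =>
    intro hL m v hv
    have ha := hL a (by simp)
    have hrest : ∀ i ∈ L, 0 ≤ i ∧ i < (tmp.length : Int) := fun i hi => hL i (by simp [hi])
    simp only [List.foldl_cons]
    rw [pnn_getD_set_int tmp k a (-1) 0 hk0 hk1 ha.1]
    by_cases hak : a = k
    · rw [if_pos hak, if_neg (by omega), if_neg (by simp [hak])]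
      exact ih hrest m v hv
    · rw [if_neg hak]
      by_cases hlt : v < PySem.List.pyGetD tmp a 0
      · rw [if_pos hlt, if_pos ⟨hak, hlt⟩]
        exact ih hrest a (PySem.List.pyGetD tmp a 0) (by omega)
      · rw [if_neg hlt, if_neg (by tauto)]
        exact ih hrest m v hv

theorem pnn_set_mid (p s : List Int) (v z : Int) :
    (p ++ z :: s).set p.length v = p ++ v :: s := by simp

theorem pnn_set1 (m1 m2 : Int) (F1 F2 : List Int) (v : Int) (h : F1.length < 9) :
    PySem.List.pySetD (pnnMk m1 m2 F1 F2) (1 + (F1.length : Int)) v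
      = pnnMk m1 m2 (F1 ++ [v]) F2 := by
  rw [PySem.List.pySetD_of_nonneg _ _ (by positivity)]
  have ht : ((1:Int) + (F1.length : Int)).toNat = ([m1] ++ F1).length := by simp; omega
  have h9 : 9 - F1.length = (9 - (F1.length + 1)) + 1 := by omega
  rw [ht, pnnMk, h9, List.replicate_succ]
  rw [show ([m1] ++ F1 ++ ((0:Int) :: List.replicate (9 - (F1.length + 1)) 0) ++ [m2] ++ F2 ++
        List.replicate (9 - F2.length) 0)
      = (([m1] ++ F1) ++ (0 :: (List.replicate (9 - (F1.length + 1)) 0 ++ [m2] ++ F2 ++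
        List.replicate (9 - F2.length) 0))) from by simp]
  rw [pnn_set_mid]
  simp [pnnMk]

theorem pnn_set2 (m1 m2 : Int) (F1 F2 : List Int) (v : Int) (h1 : F1.length ≤ 9)
    (h : F2.length < 9) :
    PySem.List.pySetD (pnnMk m1 m2 F1 F2) (11 + (F2.length : Int)) v
      = pnnMk m1 m2 F1 (F2 ++ [v]) := by
  rw [PySem.List.pySetD_of_nonneg _ _ (by positivity)]
  have ht : ((11:Int) + (F2.length : Int)).toNat
      = ([m1] ++ F1 ++ List.replicate (9 - F1.length) 0 ++ [m2] ++ F2).length := by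
    simp; omega
  have h9 : 9 - F2.length = (9 - (F2.length + 1)) + 1 := by omega
  rw [ht, pnnMk, h9, List.replicate_succ]
  rw [show ([m1] ++ F1 ++ List.replicate (9 - F1.length) 0 ++ [m2] ++ F2 ++
        ((0:Int) :: List.replicate (9 - (F2.length + 1)) 0))
      = (([m1] ++ F1 ++ List.replicate (9 - F1.length) 0 ++ [m2] ++ F2) ++
        (0 :: List.replicate (9 - (F2.length + 1)) 0)) from by simp]
  rw [pnn_set_mid]
  simp [pnnMk]

theorem pnn_fill_aux (m1 m2 : Int) (l : List Int) : ∀ (f1 f2 : List Int),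
    (∀ x ∈ l, 0 ≤ x ∧ x < 600) → f1.length ≤ 9 → f2.length ≤ 9 →
    l.foldl (fun s x => pnnFStep2 m2 (pnnFStep1 m1 s x) x)
        (pnnMk m1 m2 f1 f2, (1 + (f1.length : Int), 11 + (f2.length : Int)))
      = (pnnMk m1 m2 ((f1 ++ pnnGrp m1 l).take 9) ((f2 ++ pnnGrp m2 l).take 9),
         (1 + (((f1 ++ pnnGrp m1 l).take 9).length : Int),
          11 + (((f2 ++ pnnGrp m2 l).take 9).length : Int))) := by
  induction l with
  | nil =>
    intro f1 f2 _ h1 h2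
    simp [pnnGrp, List.take_of_length_le, h1, h2]
  | cons x l ih =>
    intro f1 f2 hx h1 h2
    have hl : ∀ y ∈ l, 0 ≤ y ∧ y < 600 := fun y hy => hx y (by simp [hy])
    have hg1 : pnnGrp m1 (x :: l)
        = if x / 100 = m1 then x % 100 :: pnnGrp m1 l else pnnGrp m1 l := by
      by_cases hc : x / 100 = m1 <;> simp [pnnGrp, hc]
    have hg2 : pnnGrp m2 (x :: l)
        = if x / 100 = m2 then x % 100 :: pnnGrp m2 l else pnnGrp m2 l := by
      by_cases hc : x / 100 = m2 <;> simp [pnnGrp, hc]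
    rw [List.foldl_cons]
    -- evaluate the first branch of the step
    have hstep1 : pnnFStep1 m1 (pnnMk m1 m2 f1 f2,
          (1 + (f1.length : Int), 11 + (f2.length : Int))) x
        = (pnnMk m1 m2 (if x / 100 = m1 ∧ f1.length < 9 then f1 ++ [x % 100] else f1) f2,
           (1 + (((if x / 100 = m1 ∧ f1.length < 9 then f1 ++ [x % 100] else f1).length : Int)),
            11 + (f2.length : Int))) := by
      by_cases hc : x / 100 = m1
      · by_cases hf : f1.length < 9
        · rw [pnnFStep1, if_pos hc, if_pos (by simp only []; omega)]
          rw [show (pnnMk m1 m2 f1 f2, (1 + (f1.length : Int), 11 + (f2.length : Int))).1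
              = pnnMk m1 m2 f1 f2 from rfl]
          rw [show (pnnMk m1 m2 f1 f2, (1 + (f1.length : Int), 11 + (f2.length : Int))).2.1
              = 1 + (f1.length : Int) from rfl]
          rw [pnn_set1 m1 m2 f1 f2 _ hf, if_pos ⟨hc, hf⟩]
          simp; ring
        · rw [pnnFStep1, if_pos hc, if_neg (by simp only []; omega), if_neg (by tauto)]
      · rw [pnnFStep1, if_neg hc, if_neg (by tauto)]
    rw [hstep1]
    -- evaluate the second branch of the step
    set f1' := (if x / 100 = m1 ∧ f1.length < 9 then f1 ++ [x % 100] else f1) with hf1'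
    have hf1len : f1'.length ≤ 9 := by
      rw [hf1']; split_ifs with hh
      · simp; omega
      · exact h1
    have hstep2 : pnnFStep2 m2 (pnnMk m1 m2 f1' f2,
          (1 + (f1'.length : Int), 11 + (f2.length : Int))) x
        = (pnnMk m1 m2 f1' (if x / 100 = m2 ∧ f2.length < 9 then f2 ++ [x % 100] else f2),
           (1 + (f1'.length : Int),
            11 + (((if x / 100 = m2 ∧ f2.length < 9 then f2 ++ [x % 100] else f2).length : Int)))) := by
      by_cases hc : x / 100 = m2
      · by_cases hf : f2.length < 9
        · rw [pnnFStep2, if_pos hc, if_pos (by simp only []; omega)]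
          rw [show (pnnMk m1 m2 f1' f2, (1 + (f1'.length : Int), 11 + (f2.length : Int))).1
              = pnnMk m1 m2 f1' f2 from rfl]
          rw [show (pnnMk m1 m2 f1' f2, (1 + (f1'.length : Int), 11 + (f2.length : Int))).2.2
              = 11 + (f2.length : Int) from rfl]
          rw [pnn_set2 m1 m2 f1' f2 _ hf1len hf, if_pos ⟨hc, hf⟩]
          simp; ring
        · rw [pnnFStep2, if_pos hc, if_neg (by simp only []; omega), if_neg (by tauto)]
      · rw [pnnFStep2, if_neg hc, if_neg (by tauto)]
    rw [hstep2]
    set f2' := (if x / 100 = m2 ∧ f2.length < 9 then f2 ++ [x % 100] else f2) with hf2'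
    have hf2len : f2'.length ≤ 9 := by
      rw [hf2']; split_ifs with hh
      · simp; omega
      · exact h2
    rw [ih f1' f2' hl hf1len hf2len]
    -- bookkeeping: the accumulated halves agree
    have e1 : (f1' ++ pnnGrp m1 l).take 9 = (f1 ++ pnnGrp m1 (x :: l)).take 9 := by
      rw [hg1, hf1']
      by_cases hc : x / 100 = m1
      · by_cases hf : f1.length < 9
        · simp [hc, hf]
        · have h19 : f1.length = 9 := by omega
          rw [if_neg (by tauto), if_pos hc, List.take_left' h19, List.take_left' h19]
      · simp [hc]
    have e2 : (f2' ++ pnnGrp m2 l).take 9 = (f2 ++ pnnGrp m2 (x :: l)).take 9 := by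
      rw [hg2, hf2']
      by_cases hc : x / 100 = m2
      · by_cases hf : f2.length < 9
        · simp [hc, hf]
        · have h29 : f2.length = 9 := by omega
          rw [if_neg (by tauto), if_pos hc, List.take_left' h29, List.take_left' h29]
      · simp [hc]
    rw [e1, e2]

-- A's fill-loop branches in the (equal) floordiv form that literally appears in the port
def pnnFStep1F (m1 : Int) (s : List Int × Int × Int) (x : Int) : List Int × Int × Int :=
  if PySem.Int.floordiv x 100 = m1 then
    if s.2.1 < 10 then (PySem.List.pySetD s.1 s.2.1 (PySem.Int.mod x 100), s.2.1 + 1, s.2.2) else s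
  else s

def pnnFStep2F (m2 : Int) (s : List Int × Int × Int) (x : Int) : List Int × Int × Int :=
  if PySem.Int.floordiv x 100 = m2 then
    if s.2.2 < 20 then (PySem.List.pySetD s.1 s.2.2 (PySem.Int.mod x 100), s.2.1, s.2.2 + 1) else s
  else s

theorem pnn_fstep_eq (m1 m2 x : Int) (s : List Int × Int × Int) :
    pnnFStep2F m2 (pnnFStep1F m1 s x) x = pnnFStep2 m2 (pnnFStep1 m1 s x) x := by
  simp only [pnnFStep1F, pnnFStep2F, pnnFStep1, pnnFStep2, Nat.ofNat_pos,
    PySem.Int.floordiv_eq_ediv_of_pos, PySem.Int.mod_eq_emod_of_pos]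

theorem pnn_max_inv2 (L : List Int) (f : Int → Int) (k : Int) : ∀ (m v : Int),
    0 ≤ m → m < 6 → 0 ≤ v → (∀ i ∈ L, 0 ≤ i ∧ i < 6) →
    0 ≤ (L.foldl (fun p i => if i ≠ k ∧ p.2 < f i then (i, f i) else p) (m, v)).1 ∧
    (L.foldl (fun p i => if i ≠ k ∧ p.2 < f i then (i, f i) else p) (m, v)).1 < 6 := by
  induction L with
  | nil => intro m v h0 h1 _ _; exact ⟨h0, h1⟩
  | cons a L ih =>
    intro m v h0 h1 h2 hL
    simp only [List.foldl_cons]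
    by_cases hc : a ≠ k ∧ v < f a
    · rw [if_pos hc]
      exact ih a (f a) (hL a (by simp)).1 (hL a (by simp)).2 (by omega)
        (fun i hi => hL i (by simp [hi]))
    · rw [if_neg hc]
      exact ih m v h0 h1 h2 (fun i hi => hL i (by simp [hi]))

theorem pnn_main (pre : List Int) (h : Pre_preprocess_nn pre) :
    preprocess_nn pre = preprocess_nn_alt pre := by
  have hpre : ∀ x ∈ pre, 0 ≤ x ∧ x < 600 := h
  -- characterize the counting pass
  have e1 : pnnCountLoop pre
      = [((pnnGrp 0 pre).length : Int), ((pnnGrp 1 pre).length : Int),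
         ((pnnGrp 2 pre).length : Int), ((pnnGrp 3 pre).length : Int),
         ((pnnGrp 4 pre).length : Int), ((pnnGrp 5 pre).length : Int)] := by
    unfold pnnCountLoop
    simp only [Nat.ofNat_pos, PySem.Int.floordiv_eq_ediv_of_pos]
    rw [PySem.List.foldl_pyRange_zero_pyGetD' pre 0
      (fun t x => PySem.List.pySetD t (x / 100) (PySem.List.pyGetD t (x / 100) 0 + 1))
      (List.replicate 6 0)]
    rw [show (List.replicate 6 (0:Int)) = [0,0,0,0,0,0] from rfl,
        pnn_count_aux pre 0 0 0 0 0 0 hpre]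
    norm_num
  -- the two favourite-category scans coincide
  have e2 : pnnMaxLoop (pnnCountLoop pre)
      = pnnBest1 (pnnGroups pre) := by
    rw [e1]
    unfold pnnMaxLoop pnnBest1
    rw [show (([((pnnGrp 0 pre).length : Int), ((pnnGrp 1 pre).length : Int),
         ((pnnGrp 2 pre).length : Int), ((pnnGrp 3 pre).length : Int),
         ((pnnGrp 4 pre).length : Int), ((pnnGrp 5 pre).length : Int)].length : Nat) : Int)
        = (6:Int) from by norm_num]
    refine PySem.List.foldl_congr_mem _ _ _ _ (fun acc i hi => ?_)
    have hb := PySem.List.mem_pyRange_one.mp hi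
    rw [pnn_lenD pre i hb.1 hb.2]
  have hm1b : 0 ≤ (pnnBest1 (pnnGroups pre)).1 ∧ (pnnBest1 (pnnGroups pre)).1 < 6 := by
    unfold pnnBest1
    have := pnn_max_inv (PySem.List.pyRange 0 6 1)
      (fun i => ((PySem.Dict.getD (pnnGroups pre) i []).length : Int)) 0 0
      (by norm_num) (by norm_num) (by norm_num)
      (fun i hi => by have := PySem.List.mem_pyRange_one.mp hi; omega)
    exact ⟨this.1, this.2.1⟩
  have e3 : pnnMaxLoop (PySem.List.pySetD (pnnCountLoop pre) (pnnBest1 (pnnGroups pre)).1 (-1))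
      = pnnBest2 (pnnGroups pre) (pnnBest1 (pnnGroups pre)).1 := by
    rw [e1]
    unfold pnnMaxLoop
    rw [show (((PySem.List.pySetD [((pnnGrp 0 pre).length : Int), ((pnnGrp 1 pre).length : Int),
         ((pnnGrp 2 pre).length : Int), ((pnnGrp 3 pre).length : Int),
         ((pnnGrp 4 pre).length : Int), ((pnnGrp 5 pre).length : Int)]
         (pnnBest1 (pnnGroups pre)).1 (-1)).length : Nat) : Int) = (6:Int) from by
      rw [PySem.List.length_pySetD]; norm_num]
    rw [pnn_skip_neg _ _ hm1b.1 (by simp; omega) (PySem.List.pyRange 0 6 1)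
      (fun i hi => by have := PySem.List.mem_pyRange_one.mp hi; simp; omega) 0 0 le_rfl]
    unfold pnnBest2
    refine PySem.List.foldl_congr_mem _ _ _ _ (fun acc i hi => ?_)
    have hb := PySem.List.mem_pyRange_one.mp hi
    rw [pnn_lenD pre i hb.1 hb.2]
  have hm2b : 0 ≤ (pnnBest2 (pnnGroups pre) (pnnBest1 (pnnGroups pre)).1).1 ∧
      (pnnBest2 (pnnGroups pre) (pnnBest1 (pnnGroups pre)).1).1 < 6 := by
    unfold pnnBest2
    exact pnn_max_inv2 (PySem.List.pyRange 0 6 1)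
      (fun i => ((PySem.Dict.getD (pnnGroups pre) i []).length : Int))
      (pnnBest1 (pnnGroups pre)).1 0 0
      (by norm_num) (by norm_num) (by norm_num)
      (fun i hi => by have := PySem.List.mem_pyRange_one.mp hi; omega)
  -- from here on, abbreviate the two winners
  set M1 := (pnnBest1 (pnnGroups pre)).1 with hM1
  set M2 := (pnnBest2 (pnnGroups pre) M1).1 with hM2
  -- the initial 20-slot result with res[0] and res[10] written
  have e4 : PySem.List.pySetD (PySem.List.pySetD (List.replicate 20 (0:Int)) 0 M1) 10 M2
      = pnnMk M1 M2 [] [] := by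
    rw [PySem.List.pySetD_of_nonneg _ _ (by norm_num),
        PySem.List.pySetD_of_nonneg _ _ (by norm_num)]
    rfl
  -- the fill loop
  have e5 : pnnFillLoop pre M1 M2 (pnnMk M1 M2 [] [], 1, 11)
      = (pnnMk M1 M2 ((pnnGrp M1 pre).take 9) ((pnnGrp M2 pre).take 9),
         (1 + (((pnnGrp M1 pre).take 9).length : Int),
          11 + (((pnnGrp M2 pre).take 9).length : Int))) := by
    show (List.foldl
        (fun s i => pnnFStep2F M2 (pnnFStep1F M1 s (PySem.List.pyGetD pre i 0))
          (PySem.List.pyGetD pre i 0))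
        (pnnMk M1 M2 [] [], 1, 11) (PySem.List.pyRange 0 (pre.length : Int) 1)) = _
    rw [PySem.List.foldl_pyRange_zero_pyGetD' pre 0
      (fun s x => pnnFStep2F M2 (pnnFStep1F M1 s x) x) (pnnMk M1 M2 [] [], 1, 11)]
    rw [PySem.List.foldl_congr_mem pre _ (fun s x => pnnFStep2 M2 (pnnFStep1 M1 s x) x) _
      (fun acc x _ => pnn_fstep_eq M1 M2 x acc)]
    have := pnn_fill_aux M1 M2 pre [] [] hpre (by simp) (by simp)
    simp only [List.nil_append, List.length_nil, Nat.cast_zero, add_zero] at this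
    exact this
  -- assemble side A
  have hA : preprocess_nn pre
      = pnnMk M1 M2 ((pnnGrp M1 pre).take 9) ((pnnGrp M2 pre).take 9) := by
    show (pnnFillLoop pre (pnnMaxLoop (pnnCountLoop pre)).1
        (pnnMaxLoop (PySem.List.pySetD (pnnCountLoop pre) (pnnMaxLoop (pnnCountLoop pre)).1 (-1))).1
        (PySem.List.pySetD (PySem.List.pySetD (List.replicate 20 (0:Int)) 0
            (pnnMaxLoop (pnnCountLoop pre)).1) 10
          (pnnMaxLoop (PySem.List.pySetD (pnnCountLoop pre)
            (pnnMaxLoop (pnnCountLoop pre)).1 (-1))).1, 1, 11)).1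
      = pnnMk M1 M2 ((pnnGrp M1 pre).take 9) ((pnnGrp M2 pre).take 9)
    rw [e2, ← hM1, e3, ← hM2, e4, e5]
  -- assemble side B
  have hB : preprocess_nn_alt pre
      = pnnMk M1 M2 ((pnnGrp M1 pre).take 9) ((pnnGrp M2 pre).take 9) := by
    show ([M1] ++ PySem.List.slice (PySem.Dict.getD (pnnGroups pre) M1 []) none (some 9) ++
        List.replicate (9 - (PySem.List.slice (PySem.Dict.getD (pnnGroups pre) M1 []) none (some 9)).length) 0 ++
        [M2] ++ PySem.List.slice (PySem.Dict.getD (pnnGroups pre) M2 []) none (some 9) ++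
        List.replicate (9 - (PySem.List.slice (PySem.Dict.getD (pnnGroups pre) M2 []) none (some 9)).length) 0)
      = pnnMk M1 M2 ((pnnGrp M1 pre).take 9) ((pnnGrp M2 pre).take 9)
    rw [pnn_getD_grpD pre M1 hm1b.1 hm1b.2, pnn_getD_grpD pre M2 hm2b.1 hm2b.2,
        PySem.List.slice_to (pnnGrp M1 pre) (by norm_num : (0:Int) ≤ 9),
        PySem.List.slice_to (pnnGrp M2 pre) (by norm_num : (0:Int) ≤ 9)]
    rw [show ((9:Int).toNat) = 9 from rfl]
    simp [pnnMk]
  rw [hA, hB]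

-- ===== VERDICT (by name: the statement is the Claim_ definition above) =====
theorem preprocess_nn_spec : Claim_equal_preprocess_nn := by
  intro pre _ hpre
  unfold Spec_preprocess_nn
  exact pnn_main pre hpre
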